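-- pv_equiv track=rewrite | github.com/tal2tal2/web_agent_parser | scripts/confusion_matrix.py | format_confusion_matrix
-- ===== SOURCE A (Python) =====
-- from typing import Dict, Iterable, Iterator, List, Optional, Sequence, Tuple
--
-- def format_confusion_matrix(labels: Sequence[str], matrix: Sequence[Sequence[int]]) -> str:
--     """Return a compact, readable text table. Rows=true labels, Cols=pred labels."""
--     labels = list(labels)
--     widths = [max(len("true\\pred"), *(len(l) for l in labels))]
--     for j, lab in enumerate(labels):
--         col_max = max(len(lab), *(len(str(matrix[i][j])) for i in range(len(labels))))
--         widths.append(col_max)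
--
--     def fmt_row(cells: Sequence[str]) -> str:
--         return "  ".join(c.ljust(widths[i]) for i, c in enumerate(cells))
--
--     header = fmt_row(["true\\pred", *labels])
--     lines = [header]
--     for i, y in enumerate(labels):
--         lines.append(fmt_row([y, *[str(matrix[i][j]) for j in range(len(labels))]]))
--     return "\n".join(lines)
-- ===== SOURCE B (Python) =====
-- def format_confusion_matrix(labels, matrix):
--     """Column-major: build each column of cell strings, pad it to its own width,
--     then transpose the padded columns into the output lines. No widths list."""
--     labels = list(labels)
--     n = len(labels)
--     cols = [["true\\pred", *labels]]
--     for j in range(n):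
--         cols.append([labels[j], *(str(matrix[i][j]) for i in range(n))])
--     padded = []
--     for col in cols:
--         w = max(len(c) for c in col)
--         padded.append([c.ljust(w) for c in col])
--     return "\n".join("  ".join(row) for row in zip(*padded))
-- ===== Notes on version B (the rewrite author's own statement) =====
-- stated objective: alternative
-- what changed: B works column-major with no widths array: it builds each table column as a list of cell strings, pads every column to its own width immediately, and obtains the output lines by transposing the padded columns with zip(*...), replacing A's widths-list computation followed by a row-wise formatter that looks widths up by index.
import Mathlib
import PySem

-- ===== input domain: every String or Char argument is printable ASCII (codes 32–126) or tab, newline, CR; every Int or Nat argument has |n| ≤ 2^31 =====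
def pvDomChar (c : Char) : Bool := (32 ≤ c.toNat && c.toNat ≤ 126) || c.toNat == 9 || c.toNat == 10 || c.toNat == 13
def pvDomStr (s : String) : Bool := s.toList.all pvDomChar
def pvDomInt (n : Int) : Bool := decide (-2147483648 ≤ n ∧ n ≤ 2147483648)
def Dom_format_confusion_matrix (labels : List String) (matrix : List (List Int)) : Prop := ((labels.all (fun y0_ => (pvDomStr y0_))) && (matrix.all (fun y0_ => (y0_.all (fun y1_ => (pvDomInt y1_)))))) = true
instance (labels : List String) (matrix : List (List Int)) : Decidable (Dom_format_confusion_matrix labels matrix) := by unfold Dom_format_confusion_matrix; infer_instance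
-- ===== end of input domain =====

-- B builds the table column-major (each column of cell strings padded to its own width,
-- then transposed into lines), replacing A's widths array + row-wise formatter
-- (objective: alternative decomposition, same cost).

-- s.ljust(w): pad with spaces on the right up to width w (exact: no-op when w ≤ len(s))
def pvLjust (cs : List Char) (w : Int) : List Char :=
  cs ++ List.replicate (w - (cs.length : Int)).toNat ' '

-- ===== PORT A =====
-- "  ".join(c.ljust(widths[i]) for i, c in enumerate(cells))
def fcmA_fmtRow (widths : List Int) (cells : List (List Char)) : List Char :=
  PySem.Chars.join "  ".toList
    ((PySem.List.enumerate cells).map (fun p => pvLjust p.2 (PySem.List.pyGetD widths p.1 0)))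

-- the widths loop: [max(9, *label lens)] then one column max appended per label
def fcmA_widths (labels : List String) (matrix : List (List Int)) : List Int :=
  (PySem.List.enumerate labels).foldl (fun ws p =>
    ws ++ [((List.range labels.length).map (fun (i : Nat) =>
      ((PySem.Int.toChars (PySem.List.pyGetD (PySem.List.pyGetD matrix (i : Int) []) p.1 0)).length : Int))).foldl
      max ((p.2.toList.length : Int))])
    [(labels.map (fun l => ((l.toList.length : Int)))).foldl max 9]

def format_confusion_matrix (labels : List String) (matrix : List (List Int)) : String :=
  let widths := fcmA_widths labels matrix
  let header := fcmA_fmtRow widths ("true\\pred".toList :: labels.map String.toList)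
  let lines := (PySem.List.enumerate labels).foldl (fun ls p =>
      ls ++ [fcmA_fmtRow widths (p.2.toList ::
        (List.range labels.length).map (fun (j : Nat) =>
          PySem.Int.toChars (PySem.List.pyGetD (PySem.List.pyGetD matrix p.1 []) (j : Int) 0)))])
      [header]
  String.ofList (PySem.Chars.join ['\n'] lines)

-- ===== PORT B =====
-- the column loop: cols = [["true\pred", *labels]]; then one column per predicted label
def fcmB_cols (labels : List String) (matrix : List (List Int)) : List (List (List Char)) :=
  (List.range labels.length).foldl (fun acc j =>
    acc ++ [(labels.getD j "").toList ::
      (List.range labels.length).map (fun (i : Nat) =>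
        PySem.Int.toChars (PySem.List.pyGetD (PySem.List.pyGetD matrix (i : Int) []) (j : Int) 0))])
    [("true\\pred".toList :: labels.map String.toList)]

-- pad one column to its own width; max(len(c) for c in col) ported as foldl max 0
-- (exact for the nonempty columns B builds, whose lengths are ≥ 0)
def fcmB_padCol (col : List (List Char)) : List (List Char) :=
  let w := (col.map (fun c => ((c.length : Nat) : Int))).foldl max 0
  col.map (fun c => pvLjust c w)

-- zip(*cols): truncate to the shortest column; r ranges below every column's length,
-- so the getD default is never used (exact for B's equal-length columns)
def pyZipN (cols : List (List (List Char))) : List (List (List Char)) :=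
  match cols with
  | [] => []
  | c :: cs =>
    (List.range (cs.foldl (fun m l => min m l.length) c.length)).map
      (fun r => (c :: cs).map (fun col => col.getD r []))

def format_confusion_matrix_alt (labels : List String) (matrix : List (List Int)) : String :=
  let cols := fcmB_cols labels matrix
  let padded := cols.foldl (fun acc col => acc ++ [fcmB_padCol col]) []
  String.ofList (PySem.Chars.join ['\n']
    ((pyZipN padded).map (fun row => PySem.Chars.join "  ".toList row)))

-- ===== PRECONDITION & SPEC =====
-- Pre_ excludes exactly the inputs where the Python A raises: labels == [] (TypeError in
-- max(9, *[])) and matrices with fewer than len(labels) rows, or a row among the first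
-- len(labels) with fewer than len(labels) entries (IndexError).
def Pre_format_confusion_matrix (labels : List String) (matrix : List (List Int)) : Prop :=
  labels ≠ [] ∧ labels.length ≤ matrix.length ∧
    ∀ r ∈ matrix.take labels.length, labels.length ≤ r.length
instance (labels : List String) (matrix : List (List Int)) : Decidable (Pre_format_confusion_matrix labels matrix) := by unfold Pre_format_confusion_matrix; infer_instance

def pvWitness_format_confusion_matrix : List String × List (List Int) :=
  (["a", "bb"], [[1, 22], [333, 4]])

def Spec_format_confusion_matrix (labels : List String) (matrix : List (List Int)) (out : String) : Prop := out = format_confusion_matrix_alt labels matrix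
instance (labels : List String) (matrix : List (List Int)) (out : String) : Decidable (Spec_format_confusion_matrix labels matrix out) := by unfold Spec_format_confusion_matrix; infer_instance

-- ===== CLAIM (what is proved, stated in full; the proofs are below) =====
def Claim_equal_format_confusion_matrix : Prop := ∀ (labels : List String) (matrix : List (List Int)), Dom_format_confusion_matrix labels matrix → Pre_format_confusion_matrix labels matrix → Spec_format_confusion_matrix labels matrix (format_confusion_matrix labels matrix)

-- ===== LEMMAS AND PROOFS =====

-- the (r, c) cell of the string grid both programs render, (0,0) being "true\pred"
def fcmCell (labels : List String) (matrix : List (List Int)) : Nat → Nat → List Char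
  | 0, 0 => "true\\pred".toList
  | 0, c + 1 => (labels.getD c "").toList
  | r + 1, 0 => (labels.getD r "").toList
  | r + 1, c + 1 =>
      PySem.Int.toChars (PySem.List.pyGetD (PySem.List.pyGetD matrix (r : Int) []) (c : Int) 0)

-- column c and row r of the grid, and the width of column c
def fcmColC (labels : List String) (matrix : List (List Int)) (c : Nat) : List (List Char) :=
  (List.range (labels.length + 1)).map (fun r => fcmCell labels matrix r c)

def fcmRowC (labels : List String) (matrix : List (List Int)) (r : Nat) : List (List Char) :=
  (List.range (labels.length + 1)).map (fun c => fcmCell labels matrix r c)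

def fcmW (labels : List String) (matrix : List (List Int)) (c : Nat) : Int :=
  ((fcmColC labels matrix c).map (fun s => ((s.length : Nat) : Int))).foldl max 0

lemma fcm_mapLabels (labels : List String) :
    labels.map String.toList =
      (List.range labels.length).map (fun k => (labels.getD k "").toList) := by
  apply List.ext_getElem
  · simp
  · intro k h1 h2
    have hk : k < labels.length := by simpa using h1
    simp only [List.getElem_map, List.getElem_range]
    rw [List.getD_eq_getElem labels "" hk]

lemma fcm_colC_zero (labels : List String) (matrix : List (List Int)) :
    fcmColC labels matrix 0 = "true\\pred".toList :: labels.map String.toList := by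
  unfold fcmColC
  rw [List.range_succ_eq_map, List.map_cons, List.map_map, fcm_mapLabels]
  rfl

lemma fcm_colC_succ (labels : List String) (matrix : List (List Int)) (j : Nat) :
    fcmColC labels matrix (j + 1) =
      (labels.getD j "").toList ::
        (List.range labels.length).map (fun (i : Nat) =>
          PySem.Int.toChars (PySem.List.pyGetD (PySem.List.pyGetD matrix (i : Int) []) (j : Int) 0)) := by
  unfold fcmColC
  rw [List.range_succ_eq_map, List.map_cons, List.map_map]
  rfl

lemma fcm_rowC_zero (labels : List String) (matrix : List (List Int)) :
    fcmRowC labels matrix 0 = "true\\pred".toList :: labels.map String.toList := by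
  unfold fcmRowC
  rw [List.range_succ_eq_map, List.map_cons, List.map_map, fcm_mapLabels]
  rfl

lemma fcm_rowC_succ (labels : List String) (matrix : List (List Int)) (i : Nat)
    (hi : i < labels.length) :
    fcmRowC labels matrix (i + 1) =
      labels[i].toList ::
        (List.range labels.length).map (fun (j : Nat) =>
          PySem.Int.toChars (PySem.List.pyGetD (PySem.List.pyGetD matrix (i : Int) []) (j : Int) 0)) := by
  unfold fcmRowC
  rw [List.range_succ_eq_map, List.map_cons, List.map_map]
  refine congrArg₂ _ ?_ rfl
  show (labels.getD i "").toList = _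
  rw [List.getD_eq_getElem labels "" hi]

lemma fcm_colsB (labels : List String) (matrix : List (List Int)) :
    fcmB_cols labels matrix =
      (List.range (labels.length + 1)).map (fcmColC labels matrix) := by
  unfold fcmB_cols
  rw [PySem.List.foldl_append_singleton_eq_map, List.range_succ_eq_map, List.map_cons,
    List.map_map, List.singleton_append]
  congr 1
  · exact (fcm_colC_zero labels matrix).symm
  · apply List.map_congr_left
    intro j _
    exact (fcm_colC_succ labels matrix j).symm

lemma fcm_max_zero_cast (x : Nat) : max (0 : Int) (x : Int) = (x : Int) :=
  max_eq_right (Nat.cast_nonneg x)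

lemma fcm_widthsA (labels : List String) (matrix : List (List Int)) :
    fcmA_widths labels matrix =
      (List.range (labels.length + 1)).map (fcmW labels matrix) := by
  unfold fcmA_widths
  rw [PySem.List.foldl_append_singleton_eq_map, List.range_succ_eq_map, List.map_cons,
    List.map_map, List.singleton_append]
  congr 1
  · unfold fcmW
    rw [fcm_colC_zero, List.map_cons, List.map_map, List.foldl_cons]
    have h9 : max (0 : Int) (("true\\pred".toList.length : Nat) : Int) = 9 := by decide
    rw [h9]
    rfl
  · apply List.ext_getElem
    · simp [PySem.List.length_enumerate]
    · intro k h1 h2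
      have hk : k < labels.length := by
        simpa [PySem.List.length_enumerate] using h1
      simp only [List.getElem_map, PySem.List.getElem_enumerate, List.getElem_range, zero_add,
        Function.comp_def]
      unfold fcmW
      rw [fcm_colC_succ, List.map_cons, List.map_map, List.foldl_cons]
      simp only [fcm_max_zero_cast]
      rw [List.getD_eq_getElem labels "" hk]
      rfl

-- A's row formatter on a row of the grid, widths being column widths
lemma fcm_fmtRowA (labels : List String) (matrix : List (List Int)) (r : Nat) :
    fcmA_fmtRow (fcmA_widths labels matrix) (fcmRowC labels matrix r) =
      PySem.Chars.join "  ".toList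
        ((List.range (labels.length + 1)).map (fun c =>
          pvLjust (fcmCell labels matrix r c) (fcmW labels matrix c))) := by
  unfold fcmA_fmtRow
  rw [fcm_widthsA]
  congr 1
  apply List.ext_getElem
  · simp [PySem.List.length_enumerate, fcmRowC]
  · intro k h1 h2
    have hk : k < labels.length + 1 := by
      simpa [PySem.List.length_enumerate, fcmRowC] using h1
    simp only [List.getElem_map, PySem.List.getElem_enumerate, List.getElem_range, zero_add]
    rw [PySem.List.pyGetD_natCast, PySem.List.getD_map_range _ _ _ _ hk]
    congr 1
    unfold fcmRowC
    rw [List.getElem_map, List.getElem_range]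

-- A's output in canonical grid form
lemma fcm_A_canon (labels : List String) (matrix : List (List Int)) :
    format_confusion_matrix labels matrix =
      String.ofList (PySem.Chars.join ['\n']
        ((List.range (labels.length + 1)).map (fun r =>
          PySem.Chars.join "  ".toList
            ((List.range (labels.length + 1)).map (fun c =>
              pvLjust (fcmCell labels matrix r c) (fcmW labels matrix c)))))) := by
  unfold format_confusion_matrix
  dsimp only
  rw [PySem.List.foldl_append_singleton_eq_map, List.singleton_append]
  refine congrArg _ (congrArg _ ?_)
  apply List.ext_getElem
  · simp [PySem.List.length_enumerate]
  · intro k h1 h2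
    cases k with
    | zero =>
      simp only [List.getElem_cons_zero, List.getElem_map, List.getElem_range]
      rw [← fcm_fmtRowA labels matrix 0, fcm_rowC_zero]
    | succ k =>
      have hk : k < labels.length := by
        simp only [List.length_cons, List.length_map, PySem.List.length_enumerate] at h1
        omega
      simp only [List.getElem_cons_succ, List.getElem_map, PySem.List.getElem_enumerate,
        List.getElem_range, zero_add]
      rw [← fcm_fmtRowA labels matrix (k + 1), fcm_rowC_succ labels matrix k hk]

-- min-fold over equal-length columns
lemma fcm_foldl_min_const {α : Type} (k : Nat) (ls : List (List α))
    (h : ∀ l ∈ ls, l.length = k) :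
    ls.foldl (fun m l => min m l.length) k = k := by
  induction ls with
  | nil => rfl
  | cons x t ih =>
    simp only [List.foldl_cons, h x (List.mem_cons_self), min_self]
    exact ih (fun l hl => h l (List.mem_cons_of_mem x hl))

-- zip(*cols) on nonempty equal-length columns is the index transpose
lemma fcm_pyZipN_const (k : Nat) (cols : List (List (List Char))) (hne : cols ≠ [])
    (h : ∀ l ∈ cols, l.length = k) :
    pyZipN cols =
      (List.range k).map (fun r => cols.map (fun col => col.getD r [])) := by
  cases cols with
  | nil => exact absurd rfl hne
  | cons c cs =>
    simp only [pyZipN]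
    rw [h c (List.mem_cons_self),
      fcm_foldl_min_const k cs (fun l hl => h l (List.mem_cons_of_mem c hl))]

-- B's output in the same canonical grid form
lemma fcm_B_canon (labels : List String) (matrix : List (List Int)) :
    format_confusion_matrix_alt labels matrix =
      String.ofList (PySem.Chars.join ['\n']
        ((List.range (labels.length + 1)).map (fun r =>
          PySem.Chars.join "  ".toList
            ((List.range (labels.length + 1)).map (fun c =>
              pvLjust (fcmCell labels matrix r c) (fcmW labels matrix c)))))) := by
  unfold format_confusion_matrix_alt
  dsimp only
  rw [PySem.List.foldl_append_singleton_eq_map, List.nil_append, fcm_colsB, List.map_map]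
  have hlen : ∀ l ∈ (List.range (labels.length + 1)).map (fcmB_padCol ∘ fcmColC labels matrix),
      l.length = labels.length + 1 := by
    intro l hl
    simp only [List.mem_map, List.mem_range] at hl
    obtain ⟨c, _, rfl⟩ := hl
    simp [fcmB_padCol, fcmColC]
  rw [fcm_pyZipN_const (labels.length + 1) _ (by simp) hlen, List.map_map]
  refine congrArg _ (congrArg _ (List.map_congr_left ?_))
  intro r hr
  simp only [List.mem_range] at hr
  simp only [Function.comp_def]
  refine congrArg _ ?_
  apply List.ext_getElem
  · simp [fcmB_padCol]
  · intro c h1 h2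
    have hc : c < labels.length + 1 := by simpa using h1
    simp only [List.getElem_map, List.getElem_range]
    unfold fcmB_padCol
    dsimp only
    rw [List.getD_eq_getElem _ _ (by simp [fcmColC]; omega), List.getElem_map]
    congr 1
    unfold fcmColC
    rw [List.getElem_map, List.getElem_range]

theorem format_confusion_matrix_spec : Claim_equal_format_confusion_matrix := by
  intro labels matrix _ _
  unfold Spec_format_confusion_matrix
  rw [fcm_A_canon, fcm_B_canon]
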